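-- pv_equiv track=rewrite | github.com/MarcelRyan/Tubes-TBFO | FA.py | VariabelValid
-- ===== SOURCE A (Python) =====
-- def state_1(char): # Start state untuk mengecek variabel valid atau tidak
--     if ((ord(char) >= 65 and ord(char) <= 90) or (ord(char) >= 97 and ord(char) <= 122)):
--         state = 2
--     elif (ord(char) == 95 or ord(char) == 36):
--         state = 15
--     else:
--         state = 3
--     return state
--
-- def state_2(char): # final state untuk mengecek sebuah variabel valid atau tidak
--     if (ord(char) == 95 or ord(char) == 36 or (ord(char) >= 65 and ord(char) <= 90) or (ord(char) >= 97 and ord(char) <= 122) or (ord(char) >= 48 and ord(char) <= 57)):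
--         state = 2
--     else:
--         state = 3
--     return state
--
-- def state_15(char): # Apabila nama variabel diawali $ atau _
--     if ((ord(char) >= 65 and ord(char) <= 90) or (ord(char) >= 97 and ord(char) <= 122) or (ord(char) >= 48 and ord(char) <= 57)):
--         state = 2
--     elif (ord(char) == 95 or ord(char) == 36):
--         state = 15
--     else:
--         state = 3
--     return state
--
-- def state_3(char): # dead state apabila variabel sudah tidak valid
--     state = 3
--     return state
--
-- def VariabelValid(str): # Simulasi FA untuk mengecek apakah syntax variabel sudah valid menggunakan state 1, 2, 3
--     state = 1
--     for i in range(len(str)):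
--         if (state == 1):
--             state = state_1(str[i])
--         elif (state == 2):
--             state = state_2(str[i])
--         elif (state == 3):
--             state = state_3(str[i])
--         elif (state == 15):
--             state = state_15(str[i])
--
--     if (state == 2):
--         return True
--     else:
--         return False
-- ===== SOURCE B (Python) =====
-- def VariabelValid(str):  # direct whole-string checks instead of DFA simulation
--     if not str:
--         return False
--     codes = [ord(c) for c in str]
--     def valid(o):
--         return (65 <= o <= 90) or (97 <= o <= 122) or (48 <= o <= 57) or o == 95 or o == 36
--     if not all(valid(o) for o in codes):
--         return False
--     if 48 <= codes[0] <= 57: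
--         return False
--     return any(o != 95 and o != 36 for o in codes)
-- ===== Notes on version B (the rewrite author's own statement) =====
-- stated objective: simpler
-- what changed: Replaces the four transition functions and the state-machine loop with direct whole-string boolean checks: every char is an ASCII letter, digit, underscore or dollar; the first char is not a digit; and at least one char is a letter or digit.
import Mathlib
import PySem

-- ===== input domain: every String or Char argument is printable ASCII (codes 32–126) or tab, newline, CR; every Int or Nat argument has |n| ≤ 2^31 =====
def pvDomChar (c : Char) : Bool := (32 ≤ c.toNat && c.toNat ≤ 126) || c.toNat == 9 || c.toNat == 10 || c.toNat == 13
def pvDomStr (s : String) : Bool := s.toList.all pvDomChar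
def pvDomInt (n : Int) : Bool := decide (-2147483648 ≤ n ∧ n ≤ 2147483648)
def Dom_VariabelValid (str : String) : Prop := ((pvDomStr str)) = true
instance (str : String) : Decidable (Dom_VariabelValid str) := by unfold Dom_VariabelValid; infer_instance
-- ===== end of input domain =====

-- B changes the algorithm: direct whole-string checks instead of a DFA simulation; return values proved equal on all strings.

-- ===== PORT A =====
def state_1 (c : Char) : Int :=
  if (65 ≤ c.toNat ∧ c.toNat ≤ 90) ∨ (97 ≤ c.toNat ∧ c.toNat ≤ 122) then 2
  else if c.toNat = 95 ∨ c.toNat = 36 then 15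
  else 3

def state_2 (c : Char) : Int :=
  if c.toNat = 95 ∨ c.toNat = 36 ∨ (65 ≤ c.toNat ∧ c.toNat ≤ 90) ∨ (97 ≤ c.toNat ∧ c.toNat ≤ 122) ∨ (48 ≤ c.toNat ∧ c.toNat ≤ 57) then 2
  else 3

def state_15 (c : Char) : Int :=
  if (65 ≤ c.toNat ∧ c.toNat ≤ 90) ∨ (97 ≤ c.toNat ∧ c.toNat ≤ 122) ∨ (48 ≤ c.toNat ∧ c.toNat ≤ 57) then 2
  else if c.toNat = 95 ∨ c.toNat = 36 then 15
  else 3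

def state_3 (_ : Char) : Int := 3

def VariabelValid (str : String) : Bool :=
  let state := str.toList.foldl (fun state c =>
    if state = 1 then state_1 c
    else if state = 2 then state_2 c
    else if state = 3 then state_3 c
    else if state = 15 then state_15 c
    else state) (1 : Int)
  if state = 2 then true else false

-- ===== PORT B =====
def pvValid (o : Nat) : Bool :=
  (65 ≤ o && o ≤ 90) || (97 ≤ o && o ≤ 122) || (48 ≤ o && o ≤ 57) || o == 95 || o == 36

def VariabelValid_alt (str : String) : Bool :=
  match str.toList.map Char.toNat with
  | [] => false
  | o :: os =>
    if ¬ ((o :: os).all pvValid) then false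
    else if 48 ≤ o ∧ o ≤ 57 then false
    else (o :: os).any (fun x => x ≠ 95 && x ≠ 36)

-- ===== PRECONDITION & SPEC =====
def Spec_VariabelValid (str : String) (out : Bool) : Prop := out = VariabelValid_alt str
instance (str : String) (out : Bool) : Decidable (Spec_VariabelValid str out) := by unfold Spec_VariabelValid; infer_instance

-- ===== CLAIM (what is proved, stated in full; the proofs are below) =====
def Claim_equal_VariabelValid : Prop := ∀ (str : String), Dom_VariabelValid str → Spec_VariabelValid str (VariabelValid str)

-- ===== LEMMAS AND PROOFS =====

def pvStep (state : Int) (c : Char) : Int :=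
  if state = 1 then state_1 c
  else if state = 2 then state_2 c
  else if state = 3 then state_3 c
  else if state = 15 then state_15 c
  else state

theorem pvFold3 (l : List Char) : l.foldl pvStep 3 = 3 := by
  induction l with
  | nil => rfl
  | cons c t ih => simpa [pvStep, state_3] using ih

theorem pvFold2 (l : List Char) :
    l.foldl pvStep 2 = (if (l.map Char.toNat).all pvValid then 2 else 3) := by
  induction l with
  | nil => simp
  | cons c t ih =>
    simp only [List.foldl_cons, List.map_cons, List.all_cons]
    by_cases h : pvValid c.toNat = true
    · have hs : pvStep 2 c = 2 := by
        simp [pvValid] at h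
        simp [pvStep, state_2]; omega
      simp [hs, ih, h]
    · have hs : pvStep 2 c = 3 := by
        simp [pvValid] at h
        simp [pvStep, state_2]; omega
      simp only [hs, pvFold3]
      simp [Bool.eq_false_iff.mpr h]

theorem pvFold15 (l : List Char) :
    (l.foldl pvStep 15 = 2) ↔
      ((l.map Char.toNat).all pvValid = true ∧ (l.map Char.toNat).any (fun x => x ≠ 95 && x ≠ 36) = true) := by
  induction l with
  | nil => simp
  | cons c t ih =>
    simp only [List.foldl_cons, List.map_cons, List.all_cons, List.any_cons]
    by_cases hus : c.toNat = 95 ∨ c.toNat = 36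
    · have hs : pvStep 15 c = 15 := by simp [pvStep, state_15]; omega
      have hv : pvValid c.toNat = true := by simp [pvValid]; omega
      have hn : (decide (c.toNat ≠ 95) && decide (c.toNat ≠ 36)) = false := by simp; omega
      simp only [hs, hv, hn, Bool.true_and, Bool.false_or]
      exact ih
    · by_cases hal : pvValid c.toNat = true
      · have hal' : (65 ≤ c.toNat ∧ c.toNat ≤ 90) ∨ (97 ≤ c.toNat ∧ c.toNat ≤ 122) ∨
            (48 ≤ c.toNat ∧ c.toNat ≤ 57) := by
          simp [pvValid] at hal; omega
        have hs : pvStep 15 c = 2 := by simp [pvStep, state_15]; omega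
        have hn : (decide (c.toNat ≠ 95) && decide (c.toNat ≠ 36)) = true := by simp; omega
        simp only [hs, pvFold2, hal, hn, Bool.true_and, Bool.true_or]
        constructor
        · intro h
          refine ⟨?_, trivial⟩
          by_contra hb
          simp [Bool.eq_false_iff.mpr hb] at h
        · rintro ⟨h2, _⟩; simp [h2]
      · have hal' : ¬ ((65 ≤ c.toNat ∧ c.toNat ≤ 90) ∨ (97 ≤ c.toNat ∧ c.toNat ≤ 122) ∨
            (48 ≤ c.toNat ∧ c.toNat ≤ 57)) := by
          simp [pvValid] at hal; omega
        have hs : pvStep 15 c = 3 := by simp [pvStep, state_15]; omega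
        simp [hs, pvFold3, Bool.eq_false_iff.mpr hal]

-- ===== VERDICT (by name: the statement is the Claim_ definition above) =====
theorem VariabelValid_spec : Claim_equal_VariabelValid := by
  intro str _
  unfold Spec_VariabelValid VariabelValid VariabelValid_alt
  show (if str.toList.foldl pvStep 1 = 2 then true else false) = _
  cases hl : str.toList with
  | nil => simp
  | cons c t =>
    simp only [List.foldl_cons, List.map_cons]
    by_cases hlet : (65 ≤ c.toNat ∧ c.toNat ≤ 90) ∨ (97 ≤ c.toNat ∧ c.toNat ≤ 122)
    · have h1 : pvStep 1 c = 2 := by simp [pvStep, state_1]; omega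
      have hv : pvValid c.toNat = true := by simp [pvValid]; omega
      have hn : (decide (c.toNat ≠ 95) && decide (c.toNat ≠ 36)) = true := by simp; omega
      simp only [h1, pvFold2, List.all_cons, List.any_cons, hv, hn, Bool.true_and,
        Bool.true_or]
      rcases Bool.eq_false_or_eq_true ((t.map Char.toNat).all pvValid) with ha | ha
      · simp [ha]; omega
      · simp [ha]
    · by_cases hus : c.toNat = 95 ∨ c.toNat = 36
      · have h1 : pvStep 1 c = 15 := by simp [pvStep, state_1]; omega
        have hv : pvValid c.toNat = true := by simp [pvValid]; omega
        have hn : (decide (c.toNat ≠ 95) && decide (c.toNat ≠ 36)) = false := by simp; omega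
        simp only [h1, List.all_cons, List.any_cons, hv, hn, Bool.true_and, Bool.false_or]
        rcases Bool.eq_false_or_eq_true ((t.map Char.toNat).all pvValid) with ha | ha
        · rcases Bool.eq_false_or_eq_true
            ((t.map Char.toNat).any (fun x => x ≠ 95 && x ≠ 36)) with hb | hb
          · have heq : t.foldl pvStep 15 = 2 := by rw [pvFold15]; exact ⟨ha, hb⟩
            rw [if_pos heq, if_neg (by simp [ha]), if_neg (by omega), hb]
          · have hne : ¬ (t.foldl pvStep 15 = 2) := by
              rw [pvFold15]; intro h; exact Bool.false_ne_true (hb ▸ h.2)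
            rw [if_neg hne, if_neg (by simp [ha]), if_neg (by omega), hb]
        · have hne : ¬ (t.foldl pvStep 15 = 2) := by rw [pvFold15]; simp [ha]
          rw [if_neg hne, if_pos (by simp [ha])]
      · have h1 : pvStep 1 c = 3 := by simp [pvStep, state_1]; omega
        by_cases hdig : 48 ≤ c.toNat ∧ c.toNat ≤ 57
        · have hv : pvValid c.toNat = true := by simp [pvValid]; omega
          simp only [h1, pvFold3, List.all_cons, hv, Bool.true_and]
          simp [hdig]
        · have hv : pvValid c.toNat = false := by simp [pvValid]; omega
          simp [h1, pvFold3, hv]
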